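-- pv_equiv track=rewrite | github.com/LauraStotko/ProPra | Solution1/Assignment12/unique.py | find_unique_sequences
-- ===== SOURCE A (Python) =====
-- def find_unique_sequences(sequences, ks, start_index=None):
--     unique_counts = {}
--     for k in ks: # Iterates over each value of k
--         seen = {} # Initializes a dictionary to store the subsequences and the genes they are found in
--         unique_in_gene = {} # Initializes a dictionary to store whether a sequence is unique in a gene
--         for seq_id, seq in sequences.items():
--             unique_in_gene[seq_id] = False # Initializes each gene as not having a unique sequence
--             if start_index is not None and start_index + k <= len(seq):
--                 subseq = seq[start_index:start_index + k]
--                 if subseq not in seen: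
--                     seen[subseq] = {seq_id}
--                 else:
--                     seen[subseq].add(seq_id)
--             elif start_index is None:
--                 for i in range(len(seq) - k + 1):
--                     subseq = seq[i:i + k]
--                     if subseq in seen:
--                         seen[subseq].add(seq_id)
--                     else:
--                         seen[subseq] = {seq_id}
--
--         # Determine if a subsequence is unique in a gene
--         for subseq, ids in seen.items():
--             if len(ids) == 1:
--                 unique_in_gene[list(ids)[0]] = True
--
--         # Count the genes with at least one unique sequence
--         unique_counts[k] = sum(unique_in_gene.values())
--     return unique_counts
-- ===== SOURCE B (Python) =====
-- def find_unique_sequences(sequences, ks, start_index=None):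
--     unique_counts = {}
--     for k in ks:
--         # collect all (substring, gene) pairs, dedup, and sort lexicographically
--         pairs = []
--         for seq_id, seq in sequences.items():
--             if start_index is not None:
--                 if start_index + k <= len(seq):
--                     pairs.append((seq[start_index:start_index + k], seq_id))
--             else:
--                 for i in range(len(seq) - k + 1):
--                     pairs.append((seq[i:i + k], seq_id))
--         pairs = sorted(set(pairs))
--         # scan the sorted list: a run of length 1 for a substring marks its gene
--         marked = []
--         while pairs:
--             sub, gid = pairs[0]
--             rest = pairs[1:]
--             same = 0
--             while same < len(rest) and rest[same][0] == sub:
--                 same += 1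
--             if same == 0:
--                 marked.append(gid)
--             pairs = rest[same:]
--         unique_counts[k] = len(set(marked))
--     return unique_counts
-- ===== Notes on version B (the rewrite author's own statement) =====
-- stated objective: alternative
-- what changed: B abandons A's substring->gene-id-set dictionary entirely: it flattens each gene into (substring, gene) pairs, deduplicates and lexicographically sorts them, scans the sorted list for runs of length one (a substring owned by exactly one gene) collecting the owners, and returns the number of distinct owners per k (sort-then-scan instead of a hash index).
import Mathlib
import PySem

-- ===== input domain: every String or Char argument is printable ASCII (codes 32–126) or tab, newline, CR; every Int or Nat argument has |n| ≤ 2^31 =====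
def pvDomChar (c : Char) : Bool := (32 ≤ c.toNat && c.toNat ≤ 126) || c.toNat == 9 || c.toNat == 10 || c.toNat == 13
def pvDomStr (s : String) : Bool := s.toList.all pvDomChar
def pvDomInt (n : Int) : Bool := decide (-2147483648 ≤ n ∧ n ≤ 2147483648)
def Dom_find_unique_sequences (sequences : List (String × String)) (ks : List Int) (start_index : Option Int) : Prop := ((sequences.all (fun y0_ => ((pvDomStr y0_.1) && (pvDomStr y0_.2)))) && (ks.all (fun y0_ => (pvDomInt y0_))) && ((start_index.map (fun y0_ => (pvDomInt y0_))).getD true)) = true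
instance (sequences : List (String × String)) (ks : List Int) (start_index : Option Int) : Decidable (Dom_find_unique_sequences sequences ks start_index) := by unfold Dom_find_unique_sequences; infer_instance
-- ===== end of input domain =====

-- B replaces A's substring → gene-id-set dictionary with a sort-then-scan strategy: flatten to
-- deduplicated (substring, gene) pairs, sort lexicographically, scan length-1 runs, count distinct
-- owners (objective: alternative algorithm, same results).

-- ===== PORT A =====
-- 'sequences' arrives as a Python dict: normalised with Dict.ofList (last value wins, first position),
-- then iterated in insertion order like sequences.items().
def find_unique_sequences (sequences : List (String × String)) (ks : List Int) (start_index : Option Int) : List (Int × Int) :=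
  let seqd := PySem.Dict.ofList sequences
  (ks.foldl (fun (unique_counts : PySem.Dict Int Int) k =>
    -- seen : subsequence → set of gene ids; unique_in_gene : gene id → Bool
    let st := seqd.items.foldl
      (fun (st : PySem.Dict String (PySem.Set String) × PySem.Dict String Bool) p =>
        let seen := st.1
        let unique_in_gene := st.2.insert p.1 false
        match start_index with
        | some si =>
          if si + k ≤ PySem.Str.len p.2 then
            let subseq := PySem.Str.slice p.2 (some si) (some (si + k))
            if seen.contains subseq = false then
              (seen.insert subseq (PySem.Set.ofList [p.1]), unique_in_gene)
            else
              (seen.insert subseq (PySem.Set.add (seen.getD subseq PySem.Set.empty) p.1),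
               unique_in_gene)
          else (seen, unique_in_gene)
        | none =>
          ((PySem.List.pyRange 0 (PySem.Str.len p.2 - k + 1) 1).foldl (fun seen i =>
              let subseq := PySem.Str.slice p.2 (some i) (some (i + k))
              if seen.contains subseq then
                seen.insert subseq (PySem.Set.add (seen.getD subseq PySem.Set.empty) p.1)
              else
                seen.insert subseq (PySem.Set.ofList [p.1])) seen,
           unique_in_gene))
      (PySem.Dict.empty, PySem.Dict.empty)
    -- mark genes owning a subsequence seen in exactly one gene
    let uig := st.1.items.foldl
      (fun (u : PySem.Dict String Bool) e =>
        if PySem.Set.len e.2 = 1 then u.insert (e.2.getD 0 "") true else u) st.2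
    unique_counts.insert k ((uig.values.map (fun b => if b then (1 : Int) else 0)).sum))
    PySem.Dict.empty).items

-- ===== PORT B =====
-- B's run scan over the sorted pair list (the two nested whiles of Source B):
-- 'same' is the length of the run of pairs sharing the head's substring; a run of
-- length one marks the head's gene.
def pvScanB : List (String × String) → List String → List String
  | [], marked => marked
  | p :: rest, marked =>
      let same := (rest.takeWhile (fun t => t.1 == p.1)).length
      pvScanB (rest.drop same) (if same = 0 then marked ++ [p.2] else marked)
termination_by L _ => L.length
decreasing_by simp

def find_unique_sequences_alt (sequences : List (String × String)) (ks : List Int) (start_index : Option Int) : List (Int × Int) :=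
  let seqd := PySem.Dict.ofList sequences
  (ks.foldl (fun (unique_counts : PySem.Dict Int Int) k =>
    -- collect all (substring, gene) pairs
    let pairs := seqd.items.foldl
      (fun (acc : List (String × String)) p =>
        match start_index with
        | some si =>
          if si + k ≤ PySem.Str.len p.2 then
            acc ++ [(PySem.Str.slice p.2 (some si) (some (si + k)), p.1)]
          else acc
        | none =>
          (PySem.List.pyRange 0 (PySem.Str.len p.2 - k + 1) 1).foldl
            (fun acc i => acc ++ [(PySem.Str.slice p.2 (some i) (some (i + k)), p.1)]) acc)
      []
    -- sorted(set(pairs)) : dedup then lexicographic sort of the tuples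
    let pairsSorted := PySem.List.sorted2 (PySem.Set.ofList pairs) (fun r => r.1) (fun r => r.2)
    -- scan runs, then count the distinct marked genes
    let marked := pvScanB pairsSorted []
    unique_counts.insert k ((PySem.Set.ofList marked).length : Int))
    PySem.Dict.empty).items

-- ===== PRECONDITION & SPEC =====
def Spec_find_unique_sequences (sequences : List (String × String)) (ks : List Int) (start_index : Option Int) (out : List (Int × Int)) : Prop := out = find_unique_sequences_alt sequences ks start_index
instance (sequences : List (String × String)) (ks : List Int) (start_index : Option Int) (out : List (Int × Int)) : Decidable (Spec_find_unique_sequences sequences ks start_index out) := by unfold Spec_find_unique_sequences; infer_instance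

-- ===== CLAIM (what is proved, stated in full; the proofs are below) =====
def Claim_equal_find_unique_sequences : Prop := ∀ (sequences : List (String × String)) (ks : List Int) (start_index : Option Int), Dom_find_unique_sequences sequences ks start_index → Spec_find_unique_sequences sequences ks start_index (find_unique_sequences sequences ks start_index)

-- ===== LEMMAS AND PROOFS =====

-- the list of k-substrings a gene contributes (characterisation of both ports' branches)
def pvSubsOf (start_index : Option Int) (k : Int) (seq : String) : List String :=
  match start_index with
  | some si =>
    if si + k ≤ PySem.Str.len seq then [PySem.Str.slice seq (some si) (some (si + k))] else []
  | none =>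
    (PySem.List.pyRange 0 (PySem.Str.len seq - k + 1) 1).map
      (fun i => PySem.Str.slice seq (some i) (some (i + k)))

-- in how many (distinct-keyed) genes a substring occurs
def pvCnt (pairs : List (String × String)) (si : Option Int) (k : Int) (q : String) : Nat :=
  pairs.countP (fun p => decide (q ∈ pvSubsOf si k p.2))

-- "this gene owns a substring occurring in exactly one gene"
def pvPred (pairs : List (String × String)) (si : Option Int) (k : Int)
    (p : String × String) : Bool :=
  (pvSubsOf si k p.2).any (fun q => pvCnt pairs si k q == 1)

-- ---------- A-side machinery ----------

theorem pvSet_add_of_not_mem {α : Type} [BEq α] [LawfulBEq α] (s : PySem.Set α) (a : α)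
    (h : a ∉ s) : PySem.Set.add s a = s ++ [a] := by
  simp [PySem.Set.add, PySem.Set.contains, h]

-- A's seen-updating step, uniform over both "in seen / not in seen" branches
def pvSeenStep (id : String) (s : PySem.Dict String (PySem.Set String)) (sub : String) :
    PySem.Dict String (PySem.Set String) :=
  s.insert sub (PySem.Set.add (s.getD sub PySem.Set.empty) id)

theorem pvSeenFold_getD (id : String) (subs : List String)
    (s : PySem.Dict String (PySem.Set String)) (q : String) :
    (subs.foldl (pvSeenStep id) s).getD q PySem.Set.empty =
      if q ∈ subs then PySem.Set.add (s.getD q PySem.Set.empty) id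
      else s.getD q PySem.Set.empty := by
  induction subs generalizing s with
  | nil => simp
  | cons a t ih =>
    simp only [List.foldl_cons, ih, List.mem_cons]
    by_cases hqt : q ∈ t <;> by_cases hqa : q = a <;>
      simp [pvSeenStep, PySem.Dict.getD_insert, hqt, hqa]

theorem pvSeenAll_getD (pairs : List (String × String)) (si : Option Int) (k : Int)
    (s : PySem.Dict String (PySem.Set String)) (q : String) :
    (pairs.foldl (fun s p => (pvSubsOf si k p.2).foldl (pvSeenStep p.1) s) s).getD q PySem.Set.empty =
      pairs.foldl
        (fun acc p => if q ∈ pvSubsOf si k p.2 then PySem.Set.add acc p.1 else acc)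
        (s.getD q PySem.Set.empty) := by
  induction pairs generalizing s with
  | nil => rfl
  | cons p t ih =>
    simp only [List.foldl_cons, ih, pvSeenFold_getD]

theorem pvAcc_eq_filter (pairs : List (String × String)) (si : Option Int) (k : Int)
    (q : String) (acc : PySem.Set String)
    (hnd : (pairs.map Prod.fst).Nodup) (hfresh : ∀ p ∈ pairs, p.1 ∉ acc) :
    pairs.foldl (fun acc p => if q ∈ pvSubsOf si k p.2 then PySem.Set.add acc p.1 else acc) acc =
      acc ++ (pairs.filter (fun p => decide (q ∈ pvSubsOf si k p.2))).map Prod.fst := by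
  induction pairs generalizing acc with
  | nil => simp
  | cons p t ih =>
    simp only [List.map_cons, List.nodup_cons] at hnd
    by_cases hq : q ∈ pvSubsOf si k p.2
    · rw [List.foldl_cons, if_pos hq,
        pvSet_add_of_not_mem acc p.1 (hfresh p (List.mem_cons_self)),
        ih _ hnd.2 (by
          intro p' hp' hmem
          rcases List.mem_append.1 hmem with h | h
          · exact hfresh p' (List.mem_cons_of_mem _ hp') h
          · exact hnd.1 ((List.mem_singleton.1 h) ▸ List.mem_map_of_mem (f := Prod.fst) hp')),
        List.filter_cons, if_pos (by simpa using hq)]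
      simp
    · rw [List.foldl_cons, if_neg hq,
        ih _ hnd.2 (fun p' hp' => hfresh p' (List.mem_cons_of_mem _ hp')),
        List.filter_cons, if_neg (by simpa using hq)]

theorem pvSeen_nodup_keys (pairs : List (String × String)) (si : Option Int) (k : Int)
    (s : PySem.Dict String (PySem.Set String)) (h : s.keys.Nodup) :
    (pairs.foldl (fun s p => (pvSubsOf si k p.2).foldl (pvSeenStep p.1) s) s).keys.Nodup := by
  induction pairs generalizing s with
  | nil => exact h
  | cons p t ih =>
    exact ih _ (PySem.Dict.nodup_keys_foldl_insert (pvSubsOf si k p.2)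
      (fun s sub => PySem.Set.add (s.getD sub PySem.Set.empty) p.1) s h)

-- the marking fold (phase 2 of A)
theorem pvMark_getD (l : List (String × PySem.Set String)) (u : PySem.Dict String Bool)
    (id : String) :
    ((l.foldl (fun u e => if PySem.Set.len e.2 = 1 then u.insert (e.2.getD 0 "") true else u) u).getD
        id false) = true ↔
      u.getD id false = true ∨ ∃ e ∈ l, PySem.Set.len e.2 = 1 ∧ e.2.getD 0 "" = id := by
  induction l generalizing u with
  | nil => simp
  | cons e t ih =>
    simp only [List.foldl_cons]
    by_cases hc : PySem.Set.len e.2 = 1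
    · rw [if_pos hc, ih]
      constructor
      · rintro (h | h)
        · rw [PySem.Dict.getD_insert] at h
          by_cases hid : id = e.2.getD 0 ""
          · exact Or.inr ⟨e, List.mem_cons_self, hc, hid.symm⟩
          · exact Or.inl (by rwa [if_neg hid] at h)
        · rcases h with ⟨e', he', h1, h2⟩
          exact Or.inr ⟨e', List.mem_cons_of_mem _ he', h1, h2⟩
      · rintro (h | ⟨e', he', h1, h2⟩)
        · rw [PySem.Dict.getD_insert]
          by_cases hid : id = e.2.getD 0 ""
          · exact Or.inl (by rw [if_pos hid])
          · exact Or.inl (by rwa [if_neg hid])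
        · rcases List.mem_cons.1 he' with rfl | he'
          · exact Or.inl (by rw [← h2, PySem.Dict.getD_insert_self])
          · exact Or.inr ⟨e', he', h1, h2⟩
    · rw [if_neg hc, ih]
      constructor
      · rintro (h | ⟨e', he', h1, h2⟩)
        · exact Or.inl h
        · exact Or.inr ⟨e', List.mem_cons_of_mem _ he', h1, h2⟩
      · rintro (h | ⟨e', he', h1, h2⟩)
        · exact Or.inl h
        · rcases List.mem_cons.1 he' with rfl | he'
          · exact absurd h1 hc
          · exact Or.inr ⟨e', he', h1, h2⟩

theorem pvMark_keys (l : List (String × PySem.Set String)) (u : PySem.Dict String Bool)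
    (h : ∀ e ∈ l, PySem.Set.len e.2 = 1 → e.2.getD 0 "" ∈ u.keys) :
    (l.foldl (fun u e => if PySem.Set.len e.2 = 1 then u.insert (e.2.getD 0 "") true else u) u).keys
      = u.keys := by
  induction l generalizing u with
  | nil => rfl
  | cons e t ih =>
    simp only [List.foldl_cons]
    by_cases hc : PySem.Set.len e.2 = 1
    · rw [if_pos hc]
      have hk : (u.insert (e.2.getD 0 "") true).keys = u.keys :=
        PySem.Dict.keys_insert_of_contains u true
          ((PySem.Dict.contains_iff_mem_keys u _).2 (h e List.mem_cons_self hc))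
      rw [ih _ (by rw [hk]; exact fun e' he' h1 => h e' (List.mem_cons_of_mem _ he') h1), hk]
    · rw [if_neg hc]
      exact ih u (fun e' he' h1 => h e' (List.mem_cons_of_mem _ he') h1)

-- branch uniformity: both "in seen / not in seen" branches are pvSeenStep
theorem pvBranch (s : PySem.Dict String (PySem.Set String)) (id sub : String) :
    (if s.contains sub then s.insert sub (PySem.Set.add (s.getD sub PySem.Set.empty) id)
     else s.insert sub (PySem.Set.ofList [id])) = pvSeenStep id s sub := by
  by_cases h : s.contains sub
  · simp [pvSeenStep, h]
  · simp only [Bool.not_eq_true] at h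
    simp [pvSeenStep, h, PySem.Dict.getD_of_not_contains _ _ h,
      PySem.Set.ofList, PySem.Set.empty, PySem.Set.add, PySem.Set.contains]

-- A's per-gene step, named (identical to the port's inline lambda)
def pvAstep (start_index : Option Int) (k : Int)
    (st : PySem.Dict String (PySem.Set String) × PySem.Dict String Bool)
    (p : String × String) : PySem.Dict String (PySem.Set String) × PySem.Dict String Bool :=
  let seen := st.1
  let unique_in_gene := st.2.insert p.1 false
  match start_index with
  | some si =>
    if si + k ≤ PySem.Str.len p.2 then
      let subseq := PySem.Str.slice p.2 (some si) (some (si + k))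
      if seen.contains subseq = false then
        (seen.insert subseq (PySem.Set.ofList [p.1]), unique_in_gene)
      else
        (seen.insert subseq (PySem.Set.add (seen.getD subseq PySem.Set.empty) p.1),
         unique_in_gene)
    else (seen, unique_in_gene)
  | none =>
    ((PySem.List.pyRange 0 (PySem.Str.len p.2 - k + 1) 1).foldl (fun seen i =>
        let subseq := PySem.Str.slice p.2 (some i) (some (i + k))
        if seen.contains subseq then
          seen.insert subseq (PySem.Set.add (seen.getD subseq PySem.Set.empty) p.1)
        else
          seen.insert subseq (PySem.Set.ofList [p.1])) seen,
     unique_in_gene)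

-- A's per-k value and B's per-k value as functions
def pvAval (pairs : List (String × String)) (start_index : Option Int) (k : Int) : Int :=
  let st := pairs.foldl (pvAstep start_index k) (PySem.Dict.empty, PySem.Dict.empty)
  let uig := st.1.items.foldl
    (fun (u : PySem.Dict String Bool) e =>
      if PySem.Set.len e.2 = 1 then u.insert (e.2.getD 0 "") true else u) st.2
  (uig.values.map (fun b => if b then (1 : Int) else 0)).sum

def pvBval (pairs : List (String × String)) (start_index : Option Int) (k : Int) : Int :=
  let prs := pairs.foldl
    (fun (acc : List (String × String)) p =>
      match start_index with
      | some si =>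
        if si + k ≤ PySem.Str.len p.2 then
          acc ++ [(PySem.Str.slice p.2 (some si) (some (si + k)), p.1)]
        else acc
      | none =>
        (PySem.List.pyRange 0 (PySem.Str.len p.2 - k + 1) 1).foldl
          (fun acc i => acc ++ [(PySem.Str.slice p.2 (some i) (some (i + k)), p.1)]) acc)
    []
  let L := PySem.List.sorted2 (PySem.Set.ofList prs) (fun r => r.1) (fun r => r.2)
  ((PySem.Set.ofList (pvScanB L [])).length : Int)

theorem pvA_unfold (sequences : List (String × String)) (ks : List Int) (start_index : Option Int) :
    find_unique_sequences sequences ks start_index =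
      (ks.foldl (fun (d : PySem.Dict Int Int) k =>
          d.insert k (pvAval (PySem.Dict.ofList sequences).items start_index k))
        PySem.Dict.empty).items := rfl

theorem pvB_unfold (sequences : List (String × String)) (ks : List Int) (start_index : Option Int) :
    find_unique_sequences_alt sequences ks start_index =
      (ks.foldl (fun (d : PySem.Dict Int Int) k =>
          d.insert k (pvBval (PySem.Dict.ofList sequences).items start_index k))
        PySem.Dict.empty).items := by
  cases start_index <;> rfl

-- A's pair fold splits componentwise
theorem pvPairFold (si : Option Int) (k : Int) (pairs : List (String × String))
    (st : PySem.Dict String (PySem.Set String) × PySem.Dict String Bool) :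
    pairs.foldl (pvAstep si k) st =
      (pairs.foldl (fun s p => (pvSubsOf si k p.2).foldl (pvSeenStep p.1) s) st.1,
       pairs.foldl (fun u p => u.insert p.1 false) st.2) := by
  induction pairs generalizing st with
  | nil => rfl
  | cons p t ih =>
    have hstep : pvAstep si k st p =
        ((pvSubsOf si k p.2).foldl (pvSeenStep p.1) st.1, st.2.insert p.1 false) := by
      cases si with
      | none =>
        simp only [pvAstep, pvSubsOf, List.foldl_map]
        exact congrArg (fun s => (s, st.2.insert p.1 false))
          (PySem.List.foldl_congr_mem _ _ _ _ (fun acc i _ => pvBranch acc p.1 _))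
      | some s0 =>
        simp only [pvAstep, pvSubsOf]
        by_cases hc : s0 + k ≤ PySem.Str.len p.2
        · rw [if_pos hc, if_pos hc]
          simp only [List.foldl_cons, List.foldl_nil]
          by_cases hcontains : st.1.contains (PySem.Str.slice p.2 (some s0) (some (s0 + k)))
          · rw [if_neg (by simp [hcontains])]
            simp [pvSeenStep]
          · simp only [Bool.not_eq_true] at hcontains
            rw [if_pos hcontains]
            rw [← pvBranch st.1 p.1 (PySem.Str.slice p.2 (some s0) (some (s0 + k))),
              if_neg (by simp [hcontains])]
        · rw [if_neg hc, if_neg hc]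
          simp
    rw [List.foldl_cons, List.foldl_cons, List.foldl_cons, hstep, ih]

-- uig is all-false before the marking pass
theorem pvUig0_getD (pairs : List (String × String)) (u : PySem.Dict String Bool) (id : String)
    (h : u.getD id false = false) :
    (pairs.foldl (fun u p => u.insert p.1 false) u).getD id false = false := by
  induction pairs generalizing u with
  | nil => exact h
  | cons p t ih =>
    refine ih _ ?_
    rw [PySem.Dict.getD_insert]
    split <;> simp [h]

theorem pvUig0_keys (pairs : List (String × String))
    (hnd : (pairs.map Prod.fst).Nodup) :
    (pairs.foldl (fun (u : PySem.Dict String Bool) p => u.insert p.1 false)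
        PySem.Dict.empty).keys = pairs.map Prod.fst := by
  have h := PySem.Dict.items_foldl_insert_fresh pairs (fun p => p.1) (fun _ => false)
    PySem.Dict.empty (fun a _ => PySem.Dict.contains_empty _) hnd
  simp only [PySem.Dict.keys, h]
  simp [PySem.Dict.empty, List.map_map, Function.comp_def]

-- closed form of seen's lookups
theorem pvSeenD (pairs : List (String × String)) (si : Option Int) (k : Int) (q : String)
    (hnd : (pairs.map Prod.fst).Nodup) :
    (pairs.foldl (fun s p => (pvSubsOf si k p.2).foldl (pvSeenStep p.1) s)
        PySem.Dict.empty).getD q PySem.Set.empty =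
      (pairs.filter (fun p => decide (q ∈ pvSubsOf si k p.2))).map Prod.fst := by
  rw [pvSeenAll_getD, PySem.Dict.getD_empty]
  simpa using pvAcc_eq_filter pairs si k q PySem.Set.empty hnd (by simp [PySem.Set.empty])

-- named intermediate states of A's per-k computation
def pvSeenOf (pairs : List (String × String)) (si : Option Int) (k : Int) :
    PySem.Dict String (PySem.Set String) :=
  pairs.foldl (fun s p => (pvSubsOf si k p.2).foldl (pvSeenStep p.1) s) PySem.Dict.empty

def pvU0Of (pairs : List (String × String)) : PySem.Dict String Bool :=
  pairs.foldl (fun u p => u.insert p.1 false) PySem.Dict.empty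

def pvUOf (pairs : List (String × String)) (si : Option Int) (k : Int) :
    PySem.Dict String Bool :=
  (pvSeenOf pairs si k).items.foldl
    (fun u e => if PySem.Set.len e.2 = 1 then u.insert (e.2.getD 0 "") true else u)
    (pvU0Of pairs)

theorem pvSeenOf_getD (pairs : List (String × String)) (si : Option Int) (k : Int) (q : String)
    (hnd : (pairs.map Prod.fst).Nodup) :
    (pvSeenOf pairs si k).getD q PySem.Set.empty =
      (pairs.filter (fun p => decide (q ∈ pvSubsOf si k p.2))).map Prod.fst := by
  unfold pvSeenOf; exact pvSeenD pairs si k q hnd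

theorem pvSeenOf_nodup (pairs : List (String × String)) (si : Option Int) (k : Int) :
    (pvSeenOf pairs si k).keys.Nodup := by
  unfold pvSeenOf
  exact pvSeen_nodup_keys pairs si k PySem.Dict.empty
    (by simp [PySem.Dict.keys, PySem.Dict.empty])

-- the central A-side fact: "this gene was marked unique" ↔ "one of its substrings has count 1"
theorem pvUD_iff (pairs : List (String × String)) (si : Option Int) (k : Int)
    (hnd : (pairs.map Prod.fst).Nodup) (p : String × String) (hp : p ∈ pairs) :
    (pvUOf pairs si k).getD p.1 false = pvPred pairs si k p := by
  rw [Bool.eq_iff_iff]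
  unfold pvUOf pvPred
  rw [pvMark_getD, List.any_eq_true]
  have h0 : (pvU0Of pairs).getD p.1 false = false := by
    unfold pvU0Of
    exact pvUig0_getD pairs _ p.1 (PySem.Dict.getD_empty _ _)
  rw [h0]
  simp only [Bool.false_eq_true, false_or]
  constructor
  · rintro ⟨e, he, h1, h2⟩
    have hget : (pvSeenOf pairs si k).getD e.1 PySem.Set.empty = e.2 := by
      rw [PySem.Dict.getD_eq_get?_getD,
        PySem.Dict.get?_of_mem_items _ he (pvSeenOf_nodup pairs si k)]
      rfl
    rw [pvSeenOf_getD pairs si k e.1 hnd] at hget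
    have hflen : (pairs.filter (fun p' => decide (e.1 ∈ pvSubsOf si k p'.2))).length = 1 := by
      have : ((pairs.filter (fun p' => decide (e.1 ∈ pvSubsOf si k p'.2))).map Prod.fst).length
          = e.2.length := by rw [hget]
      rw [List.length_map] at this
      rw [this]
      simpa [PySem.Set.len] using h1
    obtain ⟨p', hp'⟩ := List.length_eq_one_iff.1 hflen
    have hp'mem : p' ∈ pairs.filter (fun p' => decide (e.1 ∈ pvSubsOf si k p'.2)) := by
      rw [hp']; exact List.mem_singleton_self _
    have hp'pairs : p' ∈ pairs := List.mem_of_mem_filter hp'mem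
    have hp'sub : e.1 ∈ pvSubsOf si k p'.2 := by
      simpa using List.of_mem_filter hp'mem
    have he2 : e.2 = [p'.1] := by rw [← hget, hp']; rfl
    have hfst : p'.1 = p.1 := by
      have := h2
      rw [he2] at this
      simpa using this
    have hpp : p' = p := List.inj_on_of_nodup_map hnd hp'pairs hp hfst
    refine ⟨e.1, hpp ▸ hp'sub, ?_⟩
    have : pvCnt pairs si k e.1 = 1 := by
      unfold pvCnt
      rw [List.countP_eq_length_filter]
      exact hflen
    simp [this]
  · rintro ⟨q, hq, hfq⟩
    have hcount : pairs.countP (fun p' => decide (q ∈ pvSubsOf si k p'.2)) = 1 := by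
      have : pvCnt pairs si k q = 1 := by simpa using hfq
      simpa [pvCnt] using this
    have hflen : (pairs.filter (fun p' => decide (q ∈ pvSubsOf si k p'.2))).length = 1 := by
      rw [← List.countP_eq_length_filter]; exact hcount
    obtain ⟨p', hp'⟩ := List.length_eq_one_iff.1 hflen
    have hpmem : p ∈ pairs.filter (fun p' => decide (q ∈ pvSubsOf si k p'.2)) :=
      List.mem_filter.2 ⟨hp, by simpa using hq⟩
    have hpp : p' = p := by
      rw [hp'] at hpmem
      exact (List.mem_singleton.1 hpmem).symm
    have hget : (pvSeenOf pairs si k).getD q PySem.Set.empty = [p.1] := by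
      rw [pvSeenOf_getD pairs si k q hnd, hp', hpp]
      rfl
    have hcont : (pvSeenOf pairs si k).contains q = true := by
      cases hc : (pvSeenOf pairs si k).contains q with
      | false =>
        rw [PySem.Dict.getD_of_not_contains _ _ hc] at hget
        exact absurd hget (by simp [PySem.Set.empty])
      | true => rfl
    have hsome : ∃ v, (pvSeenOf pairs si k).get? q = some v := by
      rw [PySem.Dict.contains_eq_isSome_get?] at hcont
      exact Option.isSome_iff_exists.1 hcont
    obtain ⟨v, hv⟩ := hsome
    have hveq : v = [p.1] := by
      rw [PySem.Dict.getD_eq_get?_getD, hv] at hget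
      exact hget
    subst hveq
    exact ⟨(q, [p.1]), PySem.Dict.mem_items_of_get?_eq_some _ hv,
      by simp [PySem.Set.len], rfl⟩

-- A's per-k value in closed form
theorem pvAval_eq (pairs : List (String × String)) (si : Option Int) (k : Int)
    (hnd : (pairs.map Prod.fst).Nodup) :
    pvAval pairs si k = (pairs.countP (pvPred pairs si k) : Int) := by
  simp only [pvAval, pvPairFold]
  show ((pvUOf pairs si k).values.map (fun b => if b then (1 : Int) else 0)).sum = _
  have hmark : ∀ e ∈ (pvSeenOf pairs si k).items,
      PySem.Set.len e.2 = 1 → e.2.getD 0 "" ∈ (pvU0Of pairs).keys := by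
    intro e he h1
    have hget : (pvSeenOf pairs si k).getD e.1 PySem.Set.empty = e.2 := by
      rw [PySem.Dict.getD_eq_get?_getD,
        PySem.Dict.get?_of_mem_items _ he (pvSeenOf_nodup pairs si k)]
      rfl
    rw [pvSeenOf_getD pairs si k e.1 hnd] at hget
    have hlen : e.2.length = 1 := by simpa [PySem.Set.len] using h1
    obtain ⟨a, ha⟩ := List.length_eq_one_iff.1 hlen
    have hmem : a ∈ (pairs.filter (fun p' => decide (e.1 ∈ pvSubsOf si k p'.2))).map Prod.fst := by
      rw [hget, ha]; exact List.mem_singleton_self _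
    have hsub : a ∈ pairs.map Prod.fst := by
      obtain ⟨x, hx, hxa⟩ := List.mem_map.1 hmem
      exact hxa ▸ List.mem_map_of_mem (List.mem_of_mem_filter hx)
    have hA : e.2.getD 0 "" = a := by rw [ha]; rfl
    unfold pvU0Of
    rw [pvUig0_keys pairs hnd, hA]
    exact hsub
  have hUkeys : (pvUOf pairs si k).keys = pairs.map Prod.fst := by
    unfold pvUOf
    rw [pvMark_keys _ _ hmark]
    unfold pvU0Of
    exact pvUig0_keys pairs hnd
  have hUnd : (pvUOf pairs si k).keys.Nodup := by rw [hUkeys]; exact hnd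
  rw [PySem.Dict.values_eq_map_keys _ hUnd false, List.map_map]
  simp only [Function.comp_def]
  rw [PySem.List.sum_map_ite_one_zero, hUkeys]
  simp only [List.countP_map]
  refine congrArg _ (List.countP_congr ?_)
  intro p hp
  simp only [Function.comp_def]
  rw [pvUD_iff pairs si k hnd p hp]

-- ---------- B-side machinery ----------

-- the raw (substring, gene) pair list B collects
def pvRawOf (pairs : List (String × String)) (si : Option Int) (k : Int) :
    List (String × String) :=
  pairs.flatMap (fun p => (pvSubsOf si k p.2).map (fun q => (q, p.1)))

theorem pvPrs_eq (pairs : List (String × String)) (si : Option Int) (k : Int) :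
    pairs.foldl
      (fun (acc : List (String × String)) p =>
        match si with
        | some s0 =>
          if s0 + k ≤ PySem.Str.len p.2 then
            acc ++ [(PySem.Str.slice p.2 (some s0) (some (s0 + k)), p.1)]
          else acc
        | none =>
          (PySem.List.pyRange 0 (PySem.Str.len p.2 - k + 1) 1).foldl
            (fun acc i => acc ++ [(PySem.Str.slice p.2 (some i) (some (i + k)), p.1)]) acc)
      [] = pvRawOf pairs si k := by
  have hstep : ∀ (acc : List (String × String)) (p : String × String),
      (match si with
        | some s0 =>
          if s0 + k ≤ PySem.Str.len p.2 then
            acc ++ [(PySem.Str.slice p.2 (some s0) (some (s0 + k)), p.1)]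
          else acc
        | none =>
          (PySem.List.pyRange 0 (PySem.Str.len p.2 - k + 1) 1).foldl
            (fun acc i => acc ++ [(PySem.Str.slice p.2 (some i) (some (i + k)), p.1)]) acc) =
      acc ++ (pvSubsOf si k p.2).map (fun q => (q, p.1)) := by
    intro acc p
    cases si with
    | some s0 =>
      simp only [pvSubsOf]
      split_ifs with hc <;> simp
    | none =>
      simp only [pvSubsOf]
      rw [PySem.List.foldl_append_singleton_eq_map
        (fun i => (PySem.Str.slice p.2 (some i) (some (i + k)), p.1))]
      simp [List.map_map, Function.comp_def]
  rw [funext fun acc => funext fun p => hstep acc p,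
    PySem.List.foldl_append_eq_flatMap (fun p : String × String =>
      (pvSubsOf si k p.2).map (fun q => (q, p.1)))]
  rfl

-- B's deduplicated pair list and its sorted version
def pvDOf (pairs : List (String × String)) (si : Option Int) (k : Int) :
    List (String × String) :=
  PySem.Set.ofList (pvRawOf pairs si k)

def pvLOf (pairs : List (String × String)) (si : Option Int) (k : Int) :
    List (String × String) :=
  PySem.List.sorted2 (pvDOf pairs si k) (fun r => r.1) (fun r => r.2)

-- insertion sort produces a list pairwise-ordered by "not before-swapped"
theorem pvInsertBy_pairwise_step {α : Type} (before : α → α → Bool)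
    (hasym : ∀ a b, before a b = true → before b a = false)
    (htrans : ∀ a b c, before a b = true → before b c = true → before a c = true)
    (x : α) (l : List α) (hl : l.Pairwise (fun a b => before b a = false)) :
    (PySem.List.insertBy before x l).Pairwise (fun a b => before b a = false) := by
  induction l with
  | nil => simp [PySem.List.insertBy]
  | cons y ys ih =>
    rw [List.pairwise_cons] at hl
    show (if before x y then x :: y :: ys else y :: PySem.List.insertBy before x ys).Pairwise _
    split_ifs with hxy
    · refine List.pairwise_cons.2 ⟨?_, List.pairwise_cons.2 hl⟩
      intro z hz
      rcases List.mem_cons.1 hz with rfl | hz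
      · exact hasym _ _ hxy
      · cases hzx : before z x with
        | false => rfl
        | true =>
          have := htrans z x y hzx hxy
          rw [hl.1 z hz] at this
          exact absurd this (by simp)
    · refine List.pairwise_cons.2 ⟨?_, ih hl.2⟩
      intro z hz
      rcases (PySem.List.mem_insertBy before x z ys).1 hz with rfl | hz
      · simpa using hxy
      · exact hl.1 z hz

theorem pvInsertBy_pairwise {α : Type} (before : α → α → Bool)
    (hasym : ∀ a b, before a b = true → before b a = false)
    (htrans : ∀ a b c, before a b = true → before b c = true → before a c = true)
    (l : List α) :
    (l.foldl (fun acc x => PySem.List.insertBy before x acc) []).Pairwise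
      (fun a b => before b a = false) := by
  suffices h : ∀ (acc : List α), acc.Pairwise (fun a b => before b a = false) →
      (l.foldl (fun acc x => PySem.List.insertBy before x acc) acc).Pairwise
        (fun a b => before b a = false) from h [] (by simp)
  induction l with
  | nil => exact fun acc hacc => hacc
  | cons x xs ih =>
    intro acc hacc
    exact ih _ (pvInsertBy_pairwise_step before hasym htrans x acc hacc)

theorem pvL_pairwise (pairs : List (String × String)) (si : Option Int) (k : Int) :
    (pvLOf pairs si k).Pairwise (fun a b => a.1 ≤ b.1) := by
  have h := pvInsertBy_pairwise
    (fun (a b : String × String) =>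
      decide (a.1 < b.1) || (!decide (b.1 < a.1) && decide (a.2 < b.2)))
    (by
      intro a b hab
      simp only [Bool.or_eq_true, Bool.and_eq_true, Bool.not_eq_true', decide_eq_true_eq,
        decide_eq_false_iff_not] at hab
      simp only [Bool.or_eq_false_iff, Bool.and_eq_false_iff, Bool.not_eq_eq_eq_not,
        Bool.not_false, decide_eq_false_iff_not, decide_eq_true_eq]
      rcases hab with h1 | ⟨h1, h2⟩
      · exact ⟨lt_asymm h1, Or.inl h1⟩
      · exact ⟨h1, Or.inr (lt_asymm h2)⟩)
    (by
      intro a b c hab hbc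
      simp only [Bool.or_eq_true, Bool.and_eq_true, Bool.not_eq_true', decide_eq_true_eq,
        decide_eq_false_iff_not] at hab hbc ⊢
      rcases hab with h1 | ⟨h1, h2⟩ <;> rcases hbc with g1 | ⟨g1, g2⟩
      · exact Or.inl (lt_trans h1 g1)
      · exact Or.inl (lt_of_lt_of_le h1 (le_of_not_gt g1))
      · exact Or.inl (lt_of_le_of_lt (le_of_not_gt h1) g1)
      · exact Or.inr ⟨fun hca => h1 (lt_of_le_of_lt (le_of_not_gt g1) hca), lt_trans h2 g2⟩)
    (pvDOf pairs si k)
  refine List.Pairwise.imp ?_ h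
  intro a b hba
  simp only [Bool.or_eq_false_iff, decide_eq_false_iff_not] at hba
  exact le_of_not_gt hba.1

theorem pvL_perm (pairs : List (String × String)) (si : Option Int) (k : Int) :
    (pvLOf pairs si k).Perm (pvDOf pairs si k) :=
  PySem.List.sorted2_perm _ _ _ _

theorem pvMem_L (pairs : List (String × String)) (si : Option Int) (k : Int) (q id : String) :
    (q, id) ∈ pvLOf pairs si k ↔ ∃ p ∈ pairs, p.1 = id ∧ q ∈ pvSubsOf si k p.2 := by
  rw [(pvL_perm pairs si k).mem_iff]
  unfold pvDOf
  rw [PySem.Set.mem_ofList]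
  unfold pvRawOf
  simp only [List.mem_flatMap, List.mem_map]
  constructor
  · rintro ⟨p, hp, q', hq', heq⟩
    obtain ⟨h1, h2⟩ := Prod.mk.injEq .. ▸ heq
    exact ⟨p, hp, by simp_all⟩
  · rintro ⟨p, hp, h1, h2⟩
    exact ⟨p, hp, q, h2, by rw [h1]⟩

-- the substring-count in the (deduplicated, sorted) pair list is the distinct-gene count
theorem pvCountL (pairs : List (String × String)) (si : Option Int) (k : Int) (q : String)
    (hnd : (pairs.map Prod.fst).Nodup) :
    (pvLOf pairs si k).countP (fun t => t.1 == q) = pvCnt pairs si k q := by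
  rw [(pvL_perm pairs si k).countP_eq]
  have hD : (pvDOf pairs si k).Nodup := PySem.Set.nodup_ofList _
  -- left side as the length of a Nodup id list
  rw [List.countP_eq_length_filter]
  have hlen1 : ((pvDOf pairs si k).filter (fun t => t.1 == q)).length =
      (((pvDOf pairs si k).filter (fun t => t.1 == q)).map Prod.snd).length := by
    rw [List.length_map]
  rw [hlen1]
  -- right side likewise
  unfold pvCnt
  rw [List.countP_eq_length_filter]
  have hlen2 : ((pairs.filter (fun p => decide (q ∈ pvSubsOf si k p.2)))).length =
      (((pairs.filter (fun p => decide (q ∈ pvSubsOf si k p.2)))).map Prod.fst).length := by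
    rw [List.length_map]
  rw [hlen2]
  -- both are Nodup lists with the same members
  have hnd1 : (((pvDOf pairs si k).filter (fun t => t.1 == q)).map Prod.snd).Nodup := by
    refine (hD.filter _).map_on ?_
    intro x hx y hy hxy
    have hx1 : x.1 = q := by simpa using (List.of_mem_filter hx)
    have hy1 : y.1 = q := by simpa using (List.of_mem_filter hy)
    exact Prod.ext (hx1.trans hy1.symm) hxy
  have hnd2 : ((pairs.filter (fun p => decide (q ∈ pvSubsOf si k p.2))).map Prod.fst).Nodup :=
    hnd.sublist (List.Sublist.map Prod.fst (List.filter_sublist))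
  have hmem : ∀ id, id ∈ ((pvDOf pairs si k).filter (fun t => t.1 == q)).map Prod.snd ↔
      id ∈ (pairs.filter (fun p => decide (q ∈ pvSubsOf si k p.2))).map Prod.fst := by
    intro id
    simp only [List.mem_map, List.mem_filter]
    constructor
    · rintro ⟨t, ⟨htD, ht1⟩, ht2⟩
      have ht : t = (q, id) := Prod.ext (by simpa using ht1) ht2
      subst ht
      obtain ⟨p, hp, h1, h2⟩ := (pvMem_L pairs si k q id).1
        ((pvL_perm pairs si k).mem_iff.mpr htD)
      exact ⟨p, ⟨hp, by simpa using h2⟩, h1⟩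
    · rintro ⟨p, ⟨hp, hq'⟩, h1⟩
      refine ⟨(q, id), ⟨?_, by simp⟩, rfl⟩
      have : (q, id) ∈ pvLOf pairs si k :=
        (pvMem_L pairs si k q id).2 ⟨p, hp, h1, by simpa using hq'⟩
      exact (pvL_perm pairs si k).mem_iff.1 this
  exact ((List.perm_ext_iff_of_nodup hnd1 hnd2).2 hmem).length_eq

theorem pvDropWhile_gt (c : String) (l : List (String × String))
    (hl : l.Pairwise (fun a b => a.1 ≤ b.1)) (hc : ∀ t ∈ l, c ≤ t.1) :
    ∀ t ∈ l.dropWhile (fun t => t.1 == c), c < t.1 := by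
  induction l with
  | nil => simp
  | cons x xs ih =>
    rw [List.pairwise_cons] at hl
    rw [List.dropWhile_cons]
    split_ifs with hx
    · exact ih hl.2 (fun t ht => hc t (List.mem_cons_of_mem _ ht))
    · have hcx : c < x.1 :=
        lt_of_le_of_ne (hc x List.mem_cons_self) (fun h => hx (by simp [h.symm]))
      intro t ht
      rcases List.mem_cons.1 ht with rfl | ht
      · exact hcx
      · exact lt_of_lt_of_le hcx (hl.1 t ht)

-- the run scan of a fst-sorted list collects the owners of length-1 runs
theorem pvScanB_spec (L : List (String × String)) (marked : List String)
    (h : L.Pairwise (fun a b => a.1 ≤ b.1)) :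
    pvScanB L marked =
      marked ++ (L.filter (fun r => L.countP (fun t => t.1 == r.1) == 1)).map Prod.snd := by
  induction L, marked using pvScanB.induct with
  | case1 marked => simp [pvScanB]
  | case2 p rest marked same ih =>
    rw [List.pairwise_cons] at h
    set tw := rest.takeWhile (fun t => t.1 == p.1) with htw
    have hsame : same = tw.length := rfl
    set dw := rest.dropWhile (fun t => t.1 == p.1) with hdww
    have hsplit : tw ++ dw = rest := List.takeWhile_append_dropWhile
    have hdrop : rest.drop tw.length = dw := by
      conv_lhs => rw [← hsplit]
      exact List.drop_left
    have htw_eq : ∀ t ∈ tw, t.1 = p.1 := fun t ht => by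
      have := List.mem_takeWhile_imp ht
      simpa using this
    have hdw_gt : ∀ t ∈ dw, p.1 < t.1 :=
      pvDropWhile_gt p.1 rest h.2 h.1
    have hdw_pair : dw.Pairwise (fun a b => a.1 ≤ b.1) :=
      h.2.sublist (List.dropWhile_sublist _)
    -- counts
    have hcnt_tw : tw.countP (fun t => t.1 == p.1) = tw.length :=
      List.countP_eq_length.2 (fun t ht => by simp [htw_eq t ht])
    have hcnt_dw0 : dw.countP (fun t => t.1 == p.1) = 0 :=
      List.countP_eq_zero.2 (fun t ht => by
        simp only [beq_iff_eq]
        exact fun he => absurd (he ▸ hdw_gt t ht) (lt_irrefl _))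
    have hcnt_p : (p :: (tw ++ dw)).countP (fun t => t.1 == p.1) = tw.length + 1 := by
      rw [List.countP_cons, List.countP_append, hcnt_tw, hcnt_dw0]
      simp
    have hcnt_r : ∀ r ∈ dw, (p :: (tw ++ dw)).countP (fun t => t.1 == r.1) =
        dw.countP (fun t => t.1 == r.1) := by
      intro r hr
      rw [List.countP_cons, List.countP_append]
      have h1 : tw.countP (fun t => t.1 == r.1) = 0 :=
        List.countP_eq_zero.2 (fun t ht => by
          simp only [beq_iff_eq]
          intro he
          exact absurd ((htw_eq t ht) ▸ he ▸ hdw_gt r hr) (lt_irrefl _))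
      have h2 : (p.1 == r.1) = false := by
        simp only [beq_eq_false_iff_ne, ne_eq]
        exact fun he => absurd (he ▸ hdw_gt r hr) (lt_irrefl _)
      rw [h1, h2]
      simp
    -- filter decomposition
    have hfil_tw : tw.filter (fun r => (p :: (tw ++ dw)).countP (fun t => t.1 == r.1) == 1) = [] := by
      rw [List.filter_eq_nil_iff]
      intro t ht
      have heq : (fun t' : String × String => t'.1 == t.1) =
          (fun t' : String × String => t'.1 == p.1) := by
        funext t'
        rw [htw_eq t ht]
      rw [heq, hcnt_p]
      have htwlen : 0 < tw.length := List.length_pos_of_mem ht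
      simp only [beq_iff_eq]
      omega
    have hfil_dw : dw.filter (fun r => (p :: (tw ++ dw)).countP (fun t => t.1 == r.1) == 1) =
        dw.filter (fun r => dw.countP (fun t => t.1 == r.1) == 1) :=
      List.filter_congr (fun r hr => by rw [hcnt_r r hr])
    -- unfold one scan step
    rw [pvScanB]
    simp only [hsame, hdrop, dite_eq_ite] at ih
    simp only [← htw, hdrop]
    rw [ih hdw_pair, ← hsplit, List.filter_cons, List.filter_append, hfil_tw, hfil_dw,
      List.nil_append]
    by_cases h0 : tw.length = 0
    · rw [if_pos h0, if_pos (by rw [hcnt_p, h0]; simp)]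
      simp
    · rw [if_neg h0, if_neg (by rw [hcnt_p]; simp only [beq_iff_eq]; omega)]

-- B's per-k value in closed form
theorem pvBval_eq_nat (pairs : List (String × String)) (si : Option Int) (k : Int)
    (hnd : (pairs.map Prod.fst).Nodup) :
    (PySem.Set.ofList (pvScanB (pvLOf pairs si k) [])).length =
      pairs.countP (pvPred pairs si k) := by
  rw [pvScanB_spec _ _ (pvL_pairwise pairs si k), List.nil_append]
  have hnd1 : (PySem.Set.ofList
      (((pvLOf pairs si k).filter
        (fun r => (pvLOf pairs si k).countP (fun t => t.1 == r.1) == 1)).map Prod.snd)).Nodup :=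
    PySem.Set.nodup_ofList _
  have hnd2 : ((pairs.filter (pvPred pairs si k)).map Prod.fst).Nodup :=
    hnd.sublist (List.Sublist.map Prod.fst (List.filter_sublist))
  have hmem : ∀ id, id ∈ PySem.Set.ofList
      (((pvLOf pairs si k).filter
        (fun r => (pvLOf pairs si k).countP (fun t => t.1 == r.1) == 1)).map Prod.snd) ↔
      id ∈ (pairs.filter (pvPred pairs si k)).map Prod.fst := by
    intro id
    rw [PySem.Set.mem_ofList]
    simp only [List.mem_map, List.mem_filter]
    constructor
    · rintro ⟨r, ⟨hrL, hr1⟩, hr2⟩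
      obtain ⟨p, hp, h1, h2⟩ := (pvMem_L pairs si k r.1 id).1 (by
        have : r = (r.1, id) := Prod.ext rfl hr2
        exact this ▸ hrL)
      refine ⟨p, ⟨hp, ?_⟩, h1⟩
      unfold pvPred
      rw [List.any_eq_true]
      refine ⟨r.1, h2, ?_⟩
      rw [← pvCountL pairs si k r.1 hnd]
      simpa using hr1
    · rintro ⟨p, ⟨hp, hpred⟩, h1⟩
      unfold pvPred at hpred
      rw [List.any_eq_true] at hpred
      obtain ⟨q, hq, hcnt⟩ := hpred
      refine ⟨(q, id), ⟨(pvMem_L pairs si k q id).2 ⟨p, hp, h1, hq⟩, ?_⟩, rfl⟩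
      rw [pvCountL pairs si k q hnd]
      simpa using hcnt
  rw [List.countP_eq_length_filter,
    show (pairs.filter (pvPred pairs si k)).length =
      ((pairs.filter (pvPred pairs si k)).map Prod.fst).length from (List.length_map ..).symm]
  exact ((List.perm_ext_iff_of_nodup hnd1 hnd2).2 hmem).length_eq

theorem pvBval_eq (pairs : List (String × String)) (si : Option Int) (k : Int)
    (hnd : (pairs.map Prod.fst).Nodup) :
    pvBval pairs si k = (pairs.countP (pvPred pairs si k) : Int) := by
  simp only [pvBval]
  rw [pvPrs_eq pairs si k]
  exact congrArg Nat.cast (pvBval_eq_nat pairs si k hnd)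

theorem pvFoldKs (ks : List Int) (d : PySem.Dict Int Int) (f g : Int → Int)
    (h : ∀ k, f k = g k) :
    ks.foldl (fun d k => d.insert k (f k)) d = ks.foldl (fun d k => d.insert k (g k)) d := by
  induction ks generalizing d with
  | nil => rfl
  | cons a t ih => simp only [List.foldl_cons, h]

-- ===== VERDICT (by name: the statement is the Claim_ definition above) =====
theorem find_unique_sequences_spec : Claim_equal_find_unique_sequences := by
  intro sequences ks start_index _
  unfold Spec_find_unique_sequences
  rw [pvA_unfold, pvB_unfold]
  have hnd : (((PySem.Dict.ofList sequences).items).map Prod.fst).Nodup := by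
    have h := PySem.Dict.nodup_keys_ofList (ν := String) sequences
    simpa [PySem.Dict.keys] using h
  exact congrArg PySem.Dict.items (pvFoldKs ks _ _ _ (fun k => by
    rw [pvAval_eq _ start_index k hnd, pvBval_eq _ start_index k hnd]))
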